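-- pv_equiv track=rewrite | github.com/JoseGuerrero16/Sistema_penal | 05_penalty_mapper.py | determine_penalty
-- ===== SOURCE A (Python) =====
-- def determine_penalty(total_score):
--     """Determinar la pena basada en el puntaje total"""
--     penalties = [
--         (1500, "pena de muerte"),
--         (1000, "cadena perpetua"),
--         (800, "25 años de cárcel"),
--         (650, "10 años de cárcel"),
--         (500, "3 años de cárcel"),
--         (350, "8 meses de cárcel"),
--         (250, "3 meses de cárcel"),
--         (150, "trabajo comunitario"),
--         (100, "1 semana de detención"),
--         (50, "fianza $5,000"),
--         (0, "sermón")
--     ]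
--
--     for threshold, penalty in penalties:
--         if total_score >= threshold:
--             return penalty
--     return "sin pena"
-- ===== SOURCE B (Python) =====
-- THRESHOLDS = [0, 50, 100, 150, 250, 350, 500, 650, 800, 1000, 1500]
-- LABELS = [
--     "sermón",
--     "fianza $5,000",
--     "1 semana de detención",
--     "trabajo comunitario",
--     "3 meses de cárcel",
--     "8 meses de cárcel",
--     "3 años de cárcel",
--     "10 años de cárcel",
--     "25 años de cárcel",
--     "cadena perpetua",
--     "pena de muerte",
-- ]
--
--
-- def determine_penalty(total_score):
--     """Determinar la pena basada en el puntaje total"""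
--     # binary search: insertion index to the right of equal thresholds
--     lo, hi = 0, len(THRESHOLDS)
--     while lo < hi:
--         mid = (lo + hi) // 2
--         if total_score < THRESHOLDS[mid]:
--             hi = mid
--         else:
--             lo = mid + 1
--     if lo == 0:
--         return "sin pena"
--     return LABELS[lo - 1]
-- ===== Notes on version B (the rewrite author's own statement) =====
-- stated objective: alternative
-- what changed: Replaces A's top-down linear scan over (threshold, penalty) pairs with a hand-written bisect_right binary search over an ascending thresholds table paired with a parallel labels table.
import Mathlib
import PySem

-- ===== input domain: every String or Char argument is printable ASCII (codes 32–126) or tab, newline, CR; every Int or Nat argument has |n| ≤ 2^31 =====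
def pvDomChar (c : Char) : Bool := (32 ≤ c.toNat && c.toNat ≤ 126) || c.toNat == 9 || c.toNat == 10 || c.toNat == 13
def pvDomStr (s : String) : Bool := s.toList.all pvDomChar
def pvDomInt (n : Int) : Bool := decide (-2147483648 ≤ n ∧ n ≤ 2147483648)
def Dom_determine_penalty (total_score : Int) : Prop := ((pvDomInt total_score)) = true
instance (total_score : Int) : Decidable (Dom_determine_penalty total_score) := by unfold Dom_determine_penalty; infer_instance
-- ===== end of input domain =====

-- B replaces A's top-down linear scan of (threshold, penalty) pairs by a binary search
-- (hand-written bisect_right) into ascending parallel threshold/label tables (objective: idiomatic/alternative).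

-- ===== PORT A =====
def pvPenaltiesA : List (Int × String) := [
  (1500, "pena de muerte"),
  (1000, "cadena perpetua"),
  (800, "25 años de cárcel"),
  (650, "10 años de cárcel"),
  (500, "3 años de cárcel"),
  (350, "8 meses de cárcel"),
  (250, "3 meses de cárcel"),
  (150, "trabajo comunitario"),
  (100, "1 semana de detención"),
  (50, "fianza $5,000"),
  (0, "sermón")]

-- the for-loop with early return, as structural recursion over the same list
def pvScanA (ts : Int) : List (Int × String) → String
  | [] => "sin pena"
  | (threshold, penalty) :: rest =>
      if ts ≥ threshold then penalty else pvScanA ts rest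

def determine_penalty (total_score : Int) : String :=
  pvScanA total_score pvPenaltiesA

-- ===== PORT B =====
def pvThresholdsB : List Int := [0, 50, 100, 150, 250, 350, 500, 650, 800, 1000, 1500]
def pvLabelsB : List String :=
  ["sermón", "fianza $5,000", "1 semana de detención", "trabajo comunitario",
   "3 meses de cárcel", "8 meses de cárcel", "3 años de cárcel",
   "10 años de cárcel", "25 años de cárcel", "cadena perpetua", "pena de muerte"]

-- Source B's while-loop bisect; fuel only makes the loop total (11 iterations suffice, 16 given).
-- List indexing via getD is exact here: mid is always in range, so no IndexError path exists.
def pvBisectB (ts : Int) : Nat → Nat → Nat → Nat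
  | 0, lo, _ => lo
  | f + 1, lo, hi =>
      if lo < hi then
        let mid := (lo + hi) / 2
        if ts < pvThresholdsB.getD mid 0 then pvBisectB ts f lo mid
        else pvBisectB ts f (mid + 1) hi
      else lo

def determine_penalty_alt (total_score : Int) : String :=
  let lo := pvBisectB total_score 16 0 11
  if lo = 0 then "sin pena" else pvLabelsB.getD (lo - 1) ""

-- ===== PRECONDITION & SPEC =====
def Spec_determine_penalty (total_score : Int) (out : String) : Prop := out = determine_penalty_alt total_score
instance (total_score : Int) (out : String) : Decidable (Spec_determine_penalty total_score out) := by unfold Spec_determine_penalty; infer_instance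

-- ===== CLAIM (what is proved, stated in full; the proofs are below) =====
def Claim_equal_determine_penalty : Prop := ∀ (total_score : Int), Dom_determine_penalty total_score → Spec_determine_penalty total_score (determine_penalty total_score)

-- ===== LEMMAS AND PROOFS =====

-- ===== VERDICT (by name: the statement is the Claim_ definition above) =====
theorem determine_penalty_spec : Claim_equal_determine_penalty := by
  intro ts _
  unfold Spec_determine_penalty determine_penalty determine_penalty_alt
  rcases lt_or_ge ts 0 with h0|h0
  · simp [pvScanA, pvPenaltiesA, pvBisectB, pvThresholdsB, pvLabelsB, show ¬(1500:Int) ≤ ts from by omega, show ¬(1000:Int) ≤ ts from by omega, show ¬(800:Int) ≤ ts from by omega, show ¬(650:Int) ≤ ts from by omega, show ¬(500:Int) ≤ ts from by omega, show ¬(350:Int) ≤ ts from by omega, show ¬(250:Int) ≤ ts from by omega, show ¬(150:Int) ≤ ts from by omega, show ¬(100:Int) ≤ ts from by omega, show ¬(50:Int) ≤ ts from by omega, show ¬(0:Int) ≤ ts from by omega, show ts < 350 from by omega, show ts < 100 from by omega, show ts < 50 from by omega, show ts < 0 from by omega]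
  rcases lt_or_ge ts 50 with h1|h1
  · simp [pvScanA, pvPenaltiesA, pvBisectB, pvThresholdsB, pvLabelsB, show ¬(1500:Int) ≤ ts from by omega, show ¬(1000:Int) ≤ ts from by omega, show ¬(800:Int) ≤ ts from by omega, show ¬(650:Int) ≤ ts from by omega, show ¬(500:Int) ≤ ts from by omega, show ¬(350:Int) ≤ ts from by omega, show ¬(250:Int) ≤ ts from by omega, show ¬(150:Int) ≤ ts from by omega, show ¬(100:Int) ≤ ts from by omega, show ¬(50:Int) ≤ ts from by omega, show (0:Int) ≤ ts from by omega, show ts < 350 from by omega, show ts < 100 from by omega, show ts < 50 from by omega, show ¬ts < 0 from by omega]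
  rcases lt_or_ge ts 100 with h2|h2
  · simp [pvScanA, pvPenaltiesA, pvBisectB, pvThresholdsB, pvLabelsB, show ¬(1500:Int) ≤ ts from by omega, show ¬(1000:Int) ≤ ts from by omega, show ¬(800:Int) ≤ ts from by omega, show ¬(650:Int) ≤ ts from by omega, show ¬(500:Int) ≤ ts from by omega, show ¬(350:Int) ≤ ts from by omega, show ¬(250:Int) ≤ ts from by omega, show ¬(150:Int) ≤ ts from by omega, show ¬(100:Int) ≤ ts from by omega, show (50:Int) ≤ ts from by omega, show ts < 350 from by omega, show ts < 100 from by omega, show ¬ts < 50 from by omega]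
  rcases lt_or_ge ts 150 with h3|h3
  · simp [pvScanA, pvPenaltiesA, pvBisectB, pvThresholdsB, pvLabelsB, show ¬(1500:Int) ≤ ts from by omega, show ¬(1000:Int) ≤ ts from by omega, show ¬(800:Int) ≤ ts from by omega, show ¬(650:Int) ≤ ts from by omega, show ¬(500:Int) ≤ ts from by omega, show ¬(350:Int) ≤ ts from by omega, show ¬(250:Int) ≤ ts from by omega, show ¬(150:Int) ≤ ts from by omega, show (100:Int) ≤ ts from by omega, show ts < 350 from by omega, show ¬ts < 100 from by omega, show ts < 250 from by omega, show ts < 150 from by omega]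
  rcases lt_or_ge ts 250 with h4|h4
  · simp [pvScanA, pvPenaltiesA, pvBisectB, pvThresholdsB, pvLabelsB, show ¬(1500:Int) ≤ ts from by omega, show ¬(1000:Int) ≤ ts from by omega, show ¬(800:Int) ≤ ts from by omega, show ¬(650:Int) ≤ ts from by omega, show ¬(500:Int) ≤ ts from by omega, show ¬(350:Int) ≤ ts from by omega, show ¬(250:Int) ≤ ts from by omega, show (150:Int) ≤ ts from by omega, show ts < 350 from by omega, show ¬ts < 100 from by omega, show ts < 250 from by omega, show ¬ts < 150 from by omega]
  rcases lt_or_ge ts 350 with h5|h5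
  · simp [pvScanA, pvPenaltiesA, pvBisectB, pvThresholdsB, pvLabelsB, show ¬(1500:Int) ≤ ts from by omega, show ¬(1000:Int) ≤ ts from by omega, show ¬(800:Int) ≤ ts from by omega, show ¬(650:Int) ≤ ts from by omega, show ¬(500:Int) ≤ ts from by omega, show ¬(350:Int) ≤ ts from by omega, show (250:Int) ≤ ts from by omega, show ts < 350 from by omega, show ¬ts < 100 from by omega, show ¬ts < 250 from by omega]
  rcases lt_or_ge ts 500 with h6|h6
  · simp [pvScanA, pvPenaltiesA, pvBisectB, pvThresholdsB, pvLabelsB, show ¬(1500:Int) ≤ ts from by omega, show ¬(1000:Int) ≤ ts from by omega, show ¬(800:Int) ≤ ts from by omega, show ¬(650:Int) ≤ ts from by omega, show ¬(500:Int) ≤ ts from by omega, show (350:Int) ≤ ts from by omega, show ¬ts < 350 from by omega, show ts < 800 from by omega, show ts < 650 from by omega, show ts < 500 from by omega]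
  rcases lt_or_ge ts 650 with h7|h7
  · simp [pvScanA, pvPenaltiesA, pvBisectB, pvThresholdsB, pvLabelsB, show ¬(1500:Int) ≤ ts from by omega, show ¬(1000:Int) ≤ ts from by omega, show ¬(800:Int) ≤ ts from by omega, show ¬(650:Int) ≤ ts from by omega, show (500:Int) ≤ ts from by omega, show ¬ts < 350 from by omega, show ts < 800 from by omega, show ts < 650 from by omega, show ¬ts < 500 from by omega]
  rcases lt_or_ge ts 800 with h8|h8
  · simp [pvScanA, pvPenaltiesA, pvBisectB, pvThresholdsB, pvLabelsB, show ¬(1500:Int) ≤ ts from by omega, show ¬(1000:Int) ≤ ts from by omega, show ¬(800:Int) ≤ ts from by omega, show (650:Int) ≤ ts from by omega, show ¬ts < 350 from by omega, show ts < 800 from by omega, show ¬ts < 650 from by omega]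
  rcases lt_or_ge ts 1000 with h9|h9
  · simp [pvScanA, pvPenaltiesA, pvBisectB, pvThresholdsB, pvLabelsB, show ¬(1500:Int) ≤ ts from by omega, show ¬(1000:Int) ≤ ts from by omega, show (800:Int) ≤ ts from by omega, show ¬ts < 350 from by omega, show ¬ts < 800 from by omega, show ts < 1500 from by omega, show ts < 1000 from by omega]
  rcases lt_or_ge ts 1500 with h10|h10
  · simp [pvScanA, pvPenaltiesA, pvBisectB, pvThresholdsB, pvLabelsB, show ¬(1500:Int) ≤ ts from by omega, show (1000:Int) ≤ ts from by omega, show ¬ts < 350 from by omega, show ¬ts < 800 from by omega, show ts < 1500 from by omega, show ¬ts < 1000 from by omega]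
  simp [pvScanA, pvPenaltiesA, pvBisectB, pvThresholdsB, pvLabelsB, show (1500:Int) ≤ ts from by omega, show ¬ts < 350 from by omega, show ¬ts < 800 from by omega, show ¬ts < 1500 from by omega]
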